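-- pv_equiv track=rewrite | github.com/icoropensource/icormethods | classes/CLASSES_Library_DBBase_DMSWorkflow_Prototyp_PMServer_Main_IBAN.py | invalid_part
-- ===== SOURCE A (Python) =====
-- def invalid_part(form_list, iban_part):
--     """Check if syntax of the part of IBAN is invalid."""
--     for lng, a_n in form_list:
--         if lng > len(iban_part):
--             lng = len(iban_part)
--         for ch in iban_part[:lng]:
--             a = ("A" <= ch <= "Z")
--             n = ch.isdigit()
--             if (not a and not n) or \
--                (not a and a_n == "a") or \
--                (not n and a_n == "n"):
--                 return 1
--         iban_part = iban_part[lng:]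
--     return 0
-- ===== SOURCE B (Python) =====
-- def invalid_part(form_list, iban_part):
--     """Check if syntax of the part of IBAN is invalid."""
--     # Phase 1: flatten the format into one list of expected type-codes, one per
--     # character position (slice lengths give each segment's span).
--     expected = []
--     rest = iban_part
--     for lng, a_n in form_list:
--         expected += [a_n] * len(rest[:lng])
--         rest = rest[lng:]
--     # Phase 2: a single zip pass over the characters.
--     for a_n, ch in zip(expected, iban_part):
--         a = ("A" <= ch <= "Z")
--         n = ch.isdigit()
--         if (not a and not n) or (not a and a_n == "a") or (not n and a_n == "n"):
--             return 1
--     return 0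
-- ===== Notes on version B (the rewrite author's own statement) =====
-- stated objective: alternative
-- what changed: B first flattens the format list into one flat list of expected type-codes (one per character position, segment spans taken as slice lengths) and then validates in a single zip pass over the characters, replacing A's interleaved per-segment loops that test characters while consuming the string.
import Mathlib
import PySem

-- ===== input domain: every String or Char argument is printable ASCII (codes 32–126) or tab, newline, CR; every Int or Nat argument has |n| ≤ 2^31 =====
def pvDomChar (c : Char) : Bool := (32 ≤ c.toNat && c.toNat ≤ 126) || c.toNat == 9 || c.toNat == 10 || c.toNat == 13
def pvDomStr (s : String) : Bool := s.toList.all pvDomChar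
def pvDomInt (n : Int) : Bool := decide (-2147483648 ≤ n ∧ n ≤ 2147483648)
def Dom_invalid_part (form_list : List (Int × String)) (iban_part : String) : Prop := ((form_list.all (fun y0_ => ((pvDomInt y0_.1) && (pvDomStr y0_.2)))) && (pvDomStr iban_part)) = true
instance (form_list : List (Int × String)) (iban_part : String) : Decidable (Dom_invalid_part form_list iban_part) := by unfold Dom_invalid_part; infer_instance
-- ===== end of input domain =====

-- B flattens the format list once into a per-position list of expected type-codes and
-- validates with a single zip pass, instead of A's interleaved per-segment check loops
-- (alternative decomposition, same cost).


-- ===== PORT A =====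
-- shared per-character test: a = ("A" <= ch <= "Z"), n = ch.isdigit(), and the guard of the if
def pvViol (a_n : String) (ch : Char) : Bool :=
  let a : Bool := decide ('A' ≤ ch) && decide (ch ≤ 'Z')
  let n : Bool := PySem.Chars.isdigit ch
  (!a && !n) || (!a && (a_n == "a")) || (!n && (a_n == "n"))

-- 'for ch in iban_part[:lng]: … return 1' — early-exit scan of one segment
def pvSegA (a_n : String) : List Char → Bool
  | [] => false
  | ch :: rest => if pvViol a_n ch then true else pvSegA a_n rest

-- outer 'for lng, a_n in form_list' loop, consuming the string by slicing
def pvGoA : List (Int × String) → List Char → Int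
  | [], _ => 0
  | (lng, a_n) :: rest, s =>
      let lng' := if lng > (s.length : Int) then (s.length : Int) else lng
      if pvSegA a_n (PySem.List.slice s none (some lng')) then 1
      else pvGoA rest (PySem.List.slice s (some lng') none)

def invalid_part (form_list : List (Int × String)) (iban_part : String) : Int :=
  pvGoA form_list iban_part.toList

-- ===== PORT B =====
-- phase 1: 'expected += [a_n] * len(rest[:lng]); rest = rest[lng:]' over form_list
def pvExpB : List (Int × String) → List String → List Char → List String
  | [], expected, _ => expected
  | (lng, a_n) :: fs, expected, rest =>
      pvExpB fs
        (expected ++ List.replicate (PySem.List.slice rest none (some lng)).length a_n)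
        (PySem.List.slice rest (some lng) none)

-- phase 2: 'for a_n, ch in zip(expected, iban_part): … return 1' — single early-exit pass
def pvScanB : List (String × Char) → Int
  | [] => 0
  | (a_n, ch) :: rest => if pvViol a_n ch then 1 else pvScanB rest

def invalid_part_alt (form_list : List (Int × String)) (iban_part : String) : Int :=
  let cs := iban_part.toList
  pvScanB ((pvExpB form_list [] cs).zip cs)

-- ===== PRECONDITION & SPEC =====
def Spec_invalid_part (form_list : List (Int × String)) (iban_part : String) (out : Int) : Prop := out = invalid_part_alt form_list iban_part
instance (form_list : List (Int × String)) (iban_part : String) (out : Int) : Decidable (Spec_invalid_part form_list iban_part out) := by unfold Spec_invalid_part; infer_instance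

-- ===== CLAIM (what is proved, stated in full; the proofs are below) =====
def Claim_equal_invalid_part : Prop := ∀ (form_list : List (Int × String)) (iban_part : String), Dom_invalid_part form_list iban_part → Spec_invalid_part form_list iban_part (invalid_part form_list iban_part)

-- ===== LEMMAS AND PROOFS =====

-- A's redundant cap ('if lng > len: lng = len') does not move the slice point
theorem pv_clampIdx_cap (n : Nat) (lng : Int) :
    PySem.List.clampIdx n (if lng > (n : Int) then (n : Int) else lng) =
      PySem.List.clampIdx n lng := by
  simp only [PySem.List.clampIdx]
  split_ifs <;> omega

theorem pv_slice_to_clamp {α : Type} (xs : List α) (b : Int) :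
    PySem.List.slice xs none (some b) = xs.take (PySem.List.clampIdx xs.length b) := by
  simp only [PySem.List.slice, PySem.List.clampIdx, tsub_zero, List.drop_zero]

theorem pvScanB_replicate_append (a : String) (m : Nat) (E : List String) (cs : List Char) :
    pvScanB ((List.replicate m a ++ E).zip cs) =
      if pvSegA a (cs.take m) then 1 else pvScanB (E.zip (cs.drop m)) := by
  induction m generalizing cs with
  | zero => simp [pvSegA]
  | succ m ih =>
      cases cs with
      | nil => simp [pvSegA, pvScanB]
      | cons c cs' =>
          simp only [List.replicate_succ, List.cons_append, List.zip_cons_cons,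
            List.take_succ_cons, List.drop_succ_cons, pvScanB, pvSegA]
          by_cases h : pvViol a c = true
          · simp [h]
          · simp [h, ih]

theorem pvExpB_acc (fs : List (Int × String)) (exp : List String) (s : List Char) :
    pvExpB fs exp s = exp ++ pvExpB fs [] s := by
  induction fs generalizing exp s with
  | nil => simp [pvExpB]
  | cons p fs ih =>
      obtain ⟨lng, a⟩ := p
      simp only [pvExpB, List.nil_append]
      rw [ih, ih (List.replicate _ _), List.append_assoc]

theorem pvGoA_eq_scan (fs : List (Int × String)) (s : List Char) :
    pvGoA fs s = pvScanB ((pvExpB fs [] s).zip s) := by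
  induction fs generalizing s with
  | nil => simp [pvGoA, pvExpB, pvScanB]
  | cons p fs ih =>
      obtain ⟨lng, a⟩ := p
      have hk : PySem.List.clampIdx s.length lng ≤ s.length := PySem.List.clampIdx_le ..
      simp only [pvGoA, pvExpB, List.nil_append,
        PySem.List.slice_some_none, pv_slice_to_clamp, pv_clampIdx_cap,
        List.length_take, Nat.min_eq_left hk]
      rw [pvExpB_acc, pvScanB_replicate_append, ih]

-- ===== VERDICT (by name: the statement is the Claim_ definition above) =====
theorem invalid_part_spec : Claim_equal_invalid_part := by
  intro fs s _
  unfold Spec_invalid_part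
  rw [invalid_part, invalid_part_alt, pvGoA_eq_scan]
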